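-- pv_equiv track=rewrite | github.com/YAWNICK/AoC | 2015/day03/task.py | compute
-- ===== SOURCE A (Python) =====
-- def compute(s: str):
--     ## if single value:
--     s = s.strip()
--     ## if multiple values in multiple lines
--     #lines = s.splitlines()
--     #lines = lines[:-1] if lines[-1] == '' else lines
--     V = {(0, 0)}
--     x, y = 0, 0
--     for d in s[::2]:
--         if d == '^':
--             y += 1
--         elif d == 'v':
--             y -= 1
--         elif d == '<':
--             x -= 1
--         elif d == '>':
--             x += 1
--         V.add((x, y))
--     x, y = 0, 0
--     for d in s[1::2]:
--         if d == '^':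
--             y += 1
--         elif d == 'v':
--             y -= 1
--         elif d == '<':
--             x -= 1
--         elif d == '>':
--             x += 1
--         V.add((x, y))
--     return len(V)
-- ===== SOURCE B (Python) =====
-- def compute(s: str):
--     s = s.strip()
--     deltas = {'^': (0, 1), 'v': (0, -1), '<': (-1, 0), '>': (1, 0)}
--     visited = {(0, 0)}
--     cur, other = (0, 0), (0, 0)
--     for d in s:
--         dx, dy = deltas.get(d, (0, 0))
--         cur = (cur[0] + dx, cur[1] + dy)
--         visited.add(cur)
--         cur, other = other, cur
--     return len(visited)
-- ===== Notes on version B (the rewrite author's own statement) =====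
-- stated objective: simpler
-- what changed: A walks the grid twice over the two stride-2 slices s[::2] and s[1::2] with a duplicated if/elif movement chain; B makes one alternating pass over the whole string, keeping a swapping (cur, other) pair of positions and dispatching moves through a delta dict.
import Mathlib
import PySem

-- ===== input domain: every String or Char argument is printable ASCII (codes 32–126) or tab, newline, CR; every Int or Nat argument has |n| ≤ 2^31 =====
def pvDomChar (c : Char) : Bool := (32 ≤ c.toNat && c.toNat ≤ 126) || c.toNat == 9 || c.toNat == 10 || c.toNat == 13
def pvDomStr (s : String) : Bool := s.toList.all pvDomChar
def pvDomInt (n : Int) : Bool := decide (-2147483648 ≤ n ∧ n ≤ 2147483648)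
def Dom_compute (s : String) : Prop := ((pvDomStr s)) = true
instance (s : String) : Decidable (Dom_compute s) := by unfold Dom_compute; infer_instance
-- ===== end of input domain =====

-- B replaces A's two slice-loops by one alternating pass over the stripped string
-- (a swapping pair of walker positions, dict-dispatched deltas); same cost, simpler shape.

-- ===== PORT A =====
-- A's if/elif movement chain (textually identical in both of A's loops), on the (x, y) pair
def moveA (p : Int × Int) (d : Char) : Int × Int :=
  if d = '^' then (p.1, p.2 + 1)
  else if d = 'v' then (p.1, p.2 - 1)
  else if d = '<' then (p.1 - 1, p.2)
  else if d = '>' then (p.1 + 1, p.2)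
  else p

def compute (s : String) : Int :=
  let t := (PySem.Str.strip s).toList
  let V0 : PySem.Set (Int × Int) := PySem.Set.ofList [((0, 0) : Int × Int)]
  -- for d in s[::2]: move, V.add((x, y))
  let st1 := ((PySem.List.slice? t none none 2).getD []).foldl
    (fun (st : PySem.Set (Int × Int) × (Int × Int)) d =>
      let p := moveA st.2 d
      (PySem.Set.add st.1 p, p)) (V0, ((0, 0) : Int × Int))
  -- x, y = 0, 0; for d in s[1::2]: move, V.add((x, y))
  let st2 := ((PySem.List.slice? t (some 1) none 2).getD []).foldl
    (fun (st : PySem.Set (Int × Int) × (Int × Int)) d =>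
      let p := moveA st.2 d
      (PySem.Set.add st.1 p, p)) (st1.1, ((0, 0) : Int × Int))
  PySem.Set.len st2.1

-- ===== PORT B =====
def deltasB : PySem.Dict Char (Int × Int) :=
  PySem.Dict.mk [('^', ((0 : Int), (1 : Int))), ('v', (0, -1)), ('<', (-1, 0)), ('>', (1, 0))]

def compute_alt (s : String) : Int :=
  let t := (PySem.Str.strip s).toList
  -- state = (visited, cur, other); each step moves cur, records it, then swaps the pair
  let st := t.foldl
    (fun (st : PySem.Set (Int × Int) × (Int × Int) × (Int × Int)) d =>
      let dd := PySem.Dict.getD deltasB d ((0, 0) : Int × Int)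
      let cur := (st.2.1.1 + dd.1, st.2.1.2 + dd.2)
      (PySem.Set.add st.1 cur, st.2.2, cur))
    (PySem.Set.ofList [((0, 0) : Int × Int)], ((0, 0) : Int × Int), ((0, 0) : Int × Int))
  PySem.Set.len st.1

-- ===== PRECONDITION & SPEC =====
def Spec_compute (s : String) (out : Int) : Prop := out = compute_alt s
instance (s : String) (out : Int) : Decidable (Spec_compute s out) := by unfold Spec_compute; infer_instance

-- ===== CLAIM (what is proved, stated in full; the proofs are below) =====
def Claim_equal_compute : Prop := ∀ (s : String), Dom_compute s → Spec_compute s (compute s)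

-- ===== LEMMAS AND PROOFS =====

-- even-indexed elements of a list, and odd-indexed ones
def evensL {α : Type} : List α → List α
  | [] => []
  | [a] => [a]
  | a :: _ :: l => a :: evensL l

def oddsL {α : Type} (xs : List α) : List α := evensL xs.tail

theorem evensL_cons {α : Type} (a : α) (l : List α) :
    evensL (a :: l) = a :: oddsL l := by
  cases l <;> simp [evensL, oddsL]

theorem oddsL_cons {α : Type} (a : α) (l : List α) :
    oddsL (a :: l) = evensL l := by
  simp [oddsL]

-- positions visited by a single walker
def walkP (p : Int × Int) : List Char → List (Int × Int)
  | [] => []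
  | d :: l => moveA p d :: walkP (moveA p d) l

-- positions visited by the alternating pair (cur, other)
def interP (c o : Int × Int) : List Char → List (Int × Int)
  | [] => []
  | d :: l => moveA c d :: interP o (moveA c d) l

-- B's dict-dispatched delta step is A's if/elif chain
theorem moveA_eq_delta (p : Int × Int) (d : Char) :
    moveA p d = (p.1 + (PySem.Dict.getD deltasB d ((0,0) : Int × Int)).1,
                 p.2 + (PySem.Dict.getD deltasB d ((0,0) : Int × Int)).2) := by
  by_cases h1 : d = '^' <;> by_cases h2 : d = 'v' <;> by_cases h3 : d = '<' <;>
    by_cases h4 : d = '>' <;>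
  simp_all [moveA, deltasB, PySem.Dict.getD, PySem.Dict.get?, List.find?] <;>
  first
  | omega
  | (rw [beq_eq_false_iff_ne.mpr (Ne.symm h1), beq_eq_false_iff_ne.mpr (Ne.symm h2),
         beq_eq_false_iff_ne.mpr (Ne.symm h3), beq_eq_false_iff_ne.mpr (Ne.symm h4)]
     simp)

-- the alternating pass visits exactly what the two single walkers visit
theorem mem_interP (x : Int × Int) :
    ∀ (l : List Char) (c o : Int × Int),
      x ∈ interP c o l ↔ x ∈ walkP c (evensL l) ∨ x ∈ walkP o (oddsL l) := by
  intro l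
  induction l with
  | nil => simp [interP, evensL, oddsL, walkP]
  | cons d l ih =>
    intro c o
    rw [interP, evensL_cons, oddsL_cons, walkP]
    simp [ih]
    tauto

-- the even-index step-2 slice, written out
theorem filterMap_two {α : Type} (xs : List α) :
    List.filterMap (fun (k : Nat) => xs[(2 * (k : Int)).toNat]?) (List.range ((xs.length + 1) / 2))
      = evensL xs := by
  match xs with
  | [] => simp [evensL]
  | [a] => simp [evensL]
  | a :: b :: l =>
    have h : (a :: b :: l).length = l.length + 2 := by simp
    rw [h]
    have h2 : (l.length + 2 + 1) / 2 = (l.length + 1) / 2 + 1 := by omega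
    rw [h2, List.range_succ_eq_map, List.filterMap_cons, List.filterMap_map]
    have heq : List.filterMap ((fun (k : Nat) => (a :: b :: l)[(2 * (k : Int)).toNat]?) ∘ Nat.succ)
        (List.range ((l.length + 1) / 2))
        = List.filterMap (fun (k : Nat) => l[(2 * (k : Int)).toNat]?) (List.range ((l.length + 1) / 2)) := by
      apply List.filterMap_congr
      intro k _
      have h3 : (2 * ((k : Int) + 1)).toNat = 2 * k + 2 := by omega
      have h4 : (2 * (k : Int)).toNat = 2 * k := by omega
      simp [Function.comp, Nat.succ_eq_add_one, h3, h4]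
    rw [heq, filterMap_two l]
    simp [evensL]

-- s[::2] is the even-indexed elements
theorem slice?_two {α : Type} (xs : List α) :
    (PySem.List.slice? xs none none 2).getD [] = evensL xs := by
  simp only [PySem.List.slice?, PySem.List.sliceIndices]
  norm_num
  have hif : (if 0 < xs.length then (((xs.length : Int) + 2 - 1) / 2).toNat else 0)
      = (xs.length + 1) / 2 := by split_ifs <;> omega
  rw [hif, ← filterMap_two xs]

-- s[1::2] is the odd-indexed elements
theorem slice?_one_two {α : Type} (xs : List α) :
    (PySem.List.slice? xs (some 1) none 2).getD [] = oddsL xs := by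
  cases xs with
  | nil => rfl
  | cons a l =>
    simp only [PySem.List.slice?, PySem.List.sliceIndices]
    norm_num
    have hif : (if 0 < l.length then (((l.length : Int) + 2 - 1) / 2).toNat else 0)
        = (l.length + 1) / 2 := by split_ifs <;> omega
    rw [hif]
    have hodd : oddsL (a :: l) = evensL l := by simp [oddsL]
    rw [hodd, ← filterMap_two l]
    apply List.filterMap_congr
    intro k _
    have h3 : (1 + 2 * (k : Int)).toNat = 2 * k + 1 := by omega
    have h4 : (2 * (k : Int)).toNat = 2 * k := by omega
    rw [h3, h4, List.getElem?_cons_succ]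

-- A's fold: members of the resulting set
theorem foldA_mem (x : Int × Int) :
    ∀ (l : List Char) (V : PySem.Set (Int × Int)) (p : Int × Int),
      x ∈ (l.foldl (fun (st : PySem.Set (Int × Int) × (Int × Int)) d =>
            let q := moveA st.2 d; (PySem.Set.add st.1 q, q)) (V, p)).1
        ↔ x ∈ V ∨ x ∈ walkP p l := by
  intro l
  induction l with
  | nil => simp [walkP]
  | cons d l ih =>
    intro V p
    rw [List.foldl_cons, walkP]
    simp [ih, PySem.Set.mem_add]
    tauto

theorem foldA_nodup :
    ∀ (l : List Char) (V : PySem.Set (Int × Int)) (p : Int × Int), V.Nodup →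
      (l.foldl (fun (st : PySem.Set (Int × Int) × (Int × Int)) d =>
            let q := moveA st.2 d; (PySem.Set.add st.1 q, q)) (V, p)).1.Nodup := by
  intro l
  induction l with
  | nil => intro V p h; simpa using h
  | cons d l ih =>
    intro V p h
    exact ih _ _ (PySem.Set.nodup_add _ _ h)

-- B's fold: members of the resulting set
theorem foldB_mem (x : Int × Int) :
    ∀ (l : List Char) (V : PySem.Set (Int × Int)) (c o : Int × Int),
      x ∈ (l.foldl (fun (st : PySem.Set (Int × Int) × (Int × Int) × (Int × Int)) d =>
            let dd := PySem.Dict.getD deltasB d ((0, 0) : Int × Int)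
            let cur := (st.2.1.1 + dd.1, st.2.1.2 + dd.2)
            (PySem.Set.add st.1 cur, st.2.2, cur)) (V, c, o)).1
        ↔ x ∈ V ∨ x ∈ interP c o l := by
  intro l
  induction l with
  | nil => simp [interP]
  | cons d l ih =>
    intro V c o
    rw [List.foldl_cons, interP]
    simp only []
    rw [ih]
    simp [PySem.Set.mem_add, ← moveA_eq_delta]
    tauto

theorem foldB_nodup :
    ∀ (l : List Char) (V : PySem.Set (Int × Int)) (c o : Int × Int), V.Nodup →
      (l.foldl (fun (st : PySem.Set (Int × Int) × (Int × Int) × (Int × Int)) d =>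
            let dd := PySem.Dict.getD deltasB d ((0, 0) : Int × Int)
            let cur := (st.2.1.1 + dd.1, st.2.1.2 + dd.2)
            (PySem.Set.add st.1 cur, st.2.2, cur)) (V, c, o)).1.Nodup := by
  intro l
  induction l with
  | nil => intro V c o h; simpa using h
  | cons d l ih =>
    intro V c o h
    exact ih _ _ _ (PySem.Set.nodup_add _ _ h)

-- the whole equivalence, over an arbitrary character list
theorem len_eq (t : List Char) :
    PySem.Set.len (((PySem.List.slice? t (some 1) none 2).getD []).foldl
        (fun (st : PySem.Set (Int × Int) × (Int × Int)) d =>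
          let p := moveA st.2 d
          (PySem.Set.add st.1 p, p))
        ((((PySem.List.slice? t none none 2).getD []).foldl
          (fun (st : PySem.Set (Int × Int) × (Int × Int)) d =>
            let p := moveA st.2 d
            (PySem.Set.add st.1 p, p))
          (PySem.Set.ofList [((0, 0) : Int × Int)], ((0, 0) : Int × Int))).1,
         ((0, 0) : Int × Int))).1
      = PySem.Set.len (t.foldl
        (fun (st : PySem.Set (Int × Int) × (Int × Int) × (Int × Int)) d =>
          let dd := PySem.Dict.getD deltasB d ((0, 0) : Int × Int)
          let cur := (st.2.1.1 + dd.1, st.2.1.2 + dd.2)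
          (PySem.Set.add st.1 cur, st.2.2, cur))
        (PySem.Set.ofList [((0, 0) : Int × Int)], ((0, 0) : Int × Int), ((0, 0) : Int × Int))).1 := by
  rw [slice?_two, slice?_one_two]
  unfold PySem.Set.len
  congr 1
  apply List.Perm.length_eq
  rw [List.perm_ext_iff_of_nodup]
  · intro x
    rw [foldA_mem, foldA_mem, foldB_mem, mem_interP]
    simp [PySem.Set.mem_ofList]
    tauto
  · exact foldA_nodup _ _ _ (foldA_nodup _ _ _ (List.nodup_singleton _))
  · exact foldB_nodup _ _ _ _ (List.nodup_singleton _)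

-- ===== VERDICT (by name: the statement is the Claim_ definition above) =====
theorem compute_spec : Claim_equal_compute := by
  intro s _
  show compute s = compute_alt s
  exact len_eq (PySem.Str.strip s).toList
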